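-- pv_equiv track=rewrite | github.com/thelexiconlab/cochlear-full | forager-cochlear/forager/word_stems.py | check_shared_stem
-- ===== SOURCE A (Python) =====
-- def check_shared_stem(w1, w2, min_stem_len=4):
--     w1 = w1.lower()
--     w2 = w2.lower()
--     if len(w1) >= min_stem_len and w1 in w2:
--         return True
--     if len(w2) >= min_stem_len and w2 in w1:
--         return True
--     for i in range(min_stem_len, min(len(w1), len(w2))):
--         if w1[-i:] == w2[:i] or w2[-i:] == w1[:i]:
--             return True
--     return False
-- ===== SOURCE B (Python) =====
-- def check_shared_stem(w1, w2, min_stem_len=4):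
--     a = w1.lower()
--     b = w2.lower()
--     la, lb = len(a), len(b)
--     if la >= min_stem_len and a in b:
--         return True
--     if lb >= min_stem_len and b in a:
--         return True
--     M = 2305843009213693951
--     BASE = 1114113
--
--     def pref(s):
--         P = [0]
--         h = 0
--         for c in s:
--             h = (h * BASE + ord(c)) % M
--             P.append(h)
--         return P
--
--     P1 = pref(a)
--     P2 = pref(b)
--     m = min(la, lb)
--     pw = [1]
--     p = 1
--     for _ in range(m):
--         p = p * BASE % M
--         pw.append(p)
--     for i in range(max(min_stem_len, 1), m):
--         if (P1[la] - P1[la - i] * pw[i]) % M == P2[i] and a[la - i:] == b[:i]: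
--             return True
--         if (P2[lb] - P2[lb - i] * pw[i]) % M == P1[i] and b[lb - i:] == a[:i]:
--             return True
--     return False
-- ===== Notes on version B (the rewrite author's own statement) =====
-- stated objective: faster
-- what changed: B replaces A's per-length O(i) slice comparisons by Rabin-Karp rolling prefix hashes (one O(L) precompute, then an O(log i) modular hash check per candidate overlap length, with the slice compared only on a hash hit), so the overlap scan stops being quadratic.
-- outside the precondition, e.g. on check_shared_stem('aa', 'bb', -2): A returns True, B returns False
import Mathlib
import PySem

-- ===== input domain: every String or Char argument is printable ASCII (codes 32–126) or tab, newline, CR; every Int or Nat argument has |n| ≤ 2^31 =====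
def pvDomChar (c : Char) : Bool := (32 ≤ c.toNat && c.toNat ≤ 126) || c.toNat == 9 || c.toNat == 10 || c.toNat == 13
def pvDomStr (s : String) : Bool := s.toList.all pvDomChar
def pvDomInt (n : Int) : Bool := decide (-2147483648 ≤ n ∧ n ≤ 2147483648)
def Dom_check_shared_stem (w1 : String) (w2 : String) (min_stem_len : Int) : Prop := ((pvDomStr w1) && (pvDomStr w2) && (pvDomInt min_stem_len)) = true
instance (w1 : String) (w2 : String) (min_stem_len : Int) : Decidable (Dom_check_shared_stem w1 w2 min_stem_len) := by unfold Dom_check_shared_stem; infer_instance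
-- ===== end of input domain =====

-- B replaces A's per-length slice comparisons by Rabin–Karp rolling prefix hashes (O(1) hash check per
-- candidate overlap length, slices compared only on a hash hit), keeping A's exact return value.


-- ===== PORT A =====
-- 'for i in range(min_stem_len, min(len(w1), len(w2))): if …: return True' — Python's range is lazy,
-- so the loop is ported as a recursion stepping i by 1 (early return = returning true).
def pvLoopA (a : List Char) (b : List Char) (stop : Int) (i : Int) : Bool :=
  if i < stop then
    if (PySem.List.slice a (some (-i)) none == PySem.List.slice b none (some i)) ||
       (PySem.List.slice b (some (-i)) none == PySem.List.slice a none (some i)) then true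
    else pvLoopA a b stop (i + 1)
  else false
termination_by (stop - i).toNat
decreasing_by omega

def check_shared_stem (w1 : String) (w2 : String) (min_stem_len : Int) : Bool :=
  let a := PySem.Chars.lower w1.toList
  let b := PySem.Chars.lower w2.toList
  if decide (min_stem_len ≤ (a.length : Int)) && PySem.Chars.isIn a b then true
  else if decide (min_stem_len ≤ (b.length : Int)) && PySem.Chars.isIn b a then true
  else pvLoopA a b (min (a.length : Int) (b.length : Int)) min_stem_len

-- ===== PORT B =====
-- h = (h * BASE + ord(c)) % M
def pvStepH (h : Int) (c : Char) : Int :=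
  PySem.Int.mod (h * 1114113 + (c.toNat : Int)) 2305843009213693951

-- pref(s): the list of rolling hashes of the prefixes of s (P[0] = 0)
def pvPref (s : List Char) : List Int :=
  (s.foldl (fun (st : List Int × Int) c =>
      let h := pvStepH st.2 c
      (st.1 ++ [h], h)) ([0], 0)).1

-- pw = [1]; p = 1; for _ in range(m): p = p * BASE % M; pw.append(p)
def pvPows (m : Int) : List Int :=
  ((PySem.List.pyRange 0 m 1).foldl (fun (st : List Int × Int) _ =>
      let p := PySem.Int.mod (st.2 * 1114113) 2305843009213693951
      (st.1 ++ [p], p)) ([1], 1)).1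

def check_shared_stem_alt (w1 : String) (w2 : String) (min_stem_len : Int) : Bool :=
  let a := PySem.Chars.lower w1.toList
  let b := PySem.Chars.lower w2.toList
  if decide (min_stem_len ≤ (a.length : Int)) && PySem.Chars.isIn a b then true
  else if decide (min_stem_len ≤ (b.length : Int)) && PySem.Chars.isIn b a then true
  else
    let la : Int := (a.length : Int)
    let lb : Int := (b.length : Int)
    let P1 := pvPref a
    let P2 := pvPref b
    let m : Int := min la lb
    let pows := pvPows m
    (PySem.List.pyRange (max min_stem_len 1) m 1).any fun i =>
      let pw := PySem.List.pyGetD pows i 0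
      ((PySem.Int.mod (PySem.List.pyGetD P1 la 0 - PySem.List.pyGetD P1 (la - i) 0 * pw) 2305843009213693951
          == PySem.List.pyGetD P2 i 0)
        && (PySem.List.slice a (some (la - i)) none == PySem.List.slice b none (some i)))
      || ((PySem.Int.mod (PySem.List.pyGetD P2 lb 0 - PySem.List.pyGetD P2 (lb - i) 0 * pw) 2305843009213693951
          == PySem.List.pyGetD P1 i 0)
        && (PySem.List.slice b (some (lb - i)) none == PySem.List.slice a none (some i)))

-- ===== PRECONDITION & SPEC =====
-- Pre_ excludes non-positive min_stem_len, outside the function's natural domain ("minimum stem length"):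
-- there A's negative-slice wraparound compares unrelated substrings and an empty overlap is rejected only
-- by accident of slicing, behaviour B does not reproduce.
def Pre_check_shared_stem (w1 : String) (w2 : String) (min_stem_len : Int) : Prop := 1 ≤ min_stem_len
instance (w1 : String) (w2 : String) (min_stem_len : Int) : Decidable (Pre_check_shared_stem w1 w2 min_stem_len) := by unfold Pre_check_shared_stem; infer_instance

def pvWitness_check_shared_stem : String × String × Int := ("Stemming", "stems", 4)

def Spec_check_shared_stem (w1 : String) (w2 : String) (min_stem_len : Int) (out : Bool) : Prop := out = check_shared_stem_alt w1 w2 min_stem_len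
instance (w1 : String) (w2 : String) (min_stem_len : Int) (out : Bool) : Decidable (Spec_check_shared_stem w1 w2 min_stem_len out) := by unfold Spec_check_shared_stem; infer_instance

-- ===== CLAIM (what is proved, stated in full; the proofs are below) =====
def Claim_equal_check_shared_stem : Prop := ∀ (w1 : String) (w2 : String) (min_stem_len : Int), Dom_check_shared_stem w1 w2 min_stem_len → Pre_check_shared_stem w1 w2 min_stem_len → Spec_check_shared_stem w1 w2 min_stem_len (check_shared_stem w1 w2 min_stem_len)

-- ===== LEMMAS AND PROOFS =====
theorem pvStepH_modeq (h : Int) (c : Char) :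
    pvStepH h c ≡ h * 1114113 + (c.toNat : Int) [ZMOD 2305843009213693951] := by
  unfold pvStepH
  rw [PySem.Int.mod_eq_emod_of_pos (by norm_num)]
  exact Int.emod_emod_of_dvd _ dvd_rfl

theorem pvFold_modeq (d : List Char) : ∀ h : Int,
    d.foldl pvStepH h ≡ h * 1114113 ^ d.length + d.foldl pvStepH 0 [ZMOD 2305843009213693951] := by
  induction d with
  | nil => intro h; simp
  | cons c t ih =>
    intro h
    simp only [List.foldl_cons, List.length_cons, pow_succ]
    calc t.foldl pvStepH (pvStepH h c)
        ≡ pvStepH h c * 1114113 ^ t.length + t.foldl pvStepH 0 [ZMOD 2305843009213693951] := ih _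
      _ ≡ (h * 1114113 + (c.toNat : Int)) * 1114113 ^ t.length + t.foldl pvStepH 0 [ZMOD 2305843009213693951] :=
          Int.ModEq.add_right _ (Int.ModEq.mul_right _ (pvStepH_modeq h c))
      _ = h * (1114113 ^ t.length * 1114113) + ((0 * 1114113 + (c.toNat : Int)) * 1114113 ^ t.length + t.foldl pvStepH 0) := by ring
      _ ≡ h * (1114113 ^ t.length * 1114113) + t.foldl pvStepH (pvStepH 0 c) [ZMOD 2305843009213693951] :=
          Int.ModEq.add_left _ (Int.ModEq.symm ((ih _).trans
            (Int.ModEq.add_right _ (Int.ModEq.mul_right _ (pvStepH_modeq 0 c)))))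

theorem pvFold_bounds (d : List Char) (hd : d ≠ []) :
    0 ≤ d.foldl pvStepH 0 ∧ d.foldl pvStepH 0 < 2305843009213693951 := by
  rcases (List.eq_nil_or_concat d) with h | ⟨L, c, rfl⟩
  · exact absurd h hd
  · rw [List.concat_eq_append, List.foldl_append]
    simp only [List.foldl_cons, List.foldl_nil]
    unfold pvStepH
    rw [PySem.Int.mod_eq_emod_of_pos (by norm_num)]
    exact ⟨Int.emod_nonneg _ (by norm_num), Int.emod_lt_of_pos _ (by norm_num)⟩

theorem pvPref_build (s : List Char) : ∀ (acc : List Int) (h : Int),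
    (s.foldl (fun (st : List Int × Int) c =>
        let h' := pvStepH st.2 c
        (st.1 ++ [h'], h')) (acc, h)).1
    = acc ++ (List.range s.length).map (fun k => (s.take (k+1)).foldl pvStepH h) := by
  induction s with
  | nil => intro acc h; simp
  | cons c t ih =>
    intro acc h
    simp only [List.foldl_cons]
    rw [ih]
    simp only [List.length_cons]
    rw [List.range_succ_eq_map]
    simp [List.map_map, Function.comp, List.take_succ_cons, List.foldl_cons, List.append_assoc]

theorem pvPref_eq (s : List Char) :
    pvPref s = [0] ++ (List.range s.length).map (fun k => (s.take (k+1)).foldl pvStepH 0) := by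
  unfold pvPref
  exact pvPref_build s [0] 0

theorem pvPref_getD (s : List Char) (k : Nat) (hk : k ≤ s.length) :
    (pvPref s).getD k 0 = (s.take k).foldl pvStepH 0 := by
  rw [pvPref_eq]
  cases k with
  | zero => simp
  | succ k =>
    have hk' : k < s.length := by omega
    simp [List.getD, hk']

theorem pvHash_hit (a b : List Char) (k : Nat) (hk : 0 < k) (_hka : k ≤ a.length) (hkb : k ≤ b.length)
    (hs : a.drop (a.length - k) = b.take k) :
    (a.foldl pvStepH 0 - (a.take (a.length - k)).foldl pvStepH 0 * (1114113 ^ k % 2305843009213693951)) % 2305843009213693951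
      = (b.take k).foldl pvStepH 0 := by
  have hlen_d : (b.take k).length = k := by simp [hkb]
  have hne : b.take k ≠ [] := by
    intro h; rw [h] at hlen_d; simp at hlen_d; omega
  have hsplit : a = a.take (a.length - k) ++ b.take k := by
    conv_lhs => rw [← List.take_append_drop (a.length - k) a]
    rw [hs]
  have h1 : a.foldl pvStepH 0 ≡ (a.take (a.length - k)).foldl pvStepH 0 * 1114113 ^ k
      + (b.take k).foldl pvStepH 0 [ZMOD 2305843009213693951] := by
    conv_lhs => rw [hsplit, List.foldl_append]
    have h := pvFold_modeq (b.take k) ((a.take (a.length - k)).foldl pvStepH 0)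
    rwa [hlen_d] at h
  have h2 : (a.take (a.length - k)).foldl pvStepH 0 * (1114113 ^ k % 2305843009213693951)
      ≡ (a.take (a.length - k)).foldl pvStepH 0 * 1114113 ^ k [ZMOD 2305843009213693951] :=
    Int.ModEq.mul_left _ (Int.emod_emod_of_dvd _ dvd_rfl)
  have h3 := Int.ModEq.sub h1 h2
  have h4 : a.foldl pvStepH 0 - (a.take (a.length - k)).foldl pvStepH 0 * (1114113 ^ k % 2305843009213693951)
      ≡ (b.take k).foldl pvStepH 0 [ZMOD 2305843009213693951] := by
    calc _ ≡ _ [ZMOD 2305843009213693951] := h3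
      _ = (b.take k).foldl pvStepH 0 := by ring
  obtain ⟨hb0, hb1⟩ := pvFold_bounds (b.take k) hne
  calc _ = (b.take k).foldl pvStepH 0 % 2305843009213693951 := h4
    _ = (b.take k).foldl pvStepH 0 := Int.emod_eq_of_lt hb0 hb1


theorem pvLoopA_any (a b : List Char) (stop : Int) (i0 : Int) :
    pvLoopA a b stop i0 = (PySem.List.pyRange i0 stop 1).any (fun i =>
      (PySem.List.slice a (some (-i)) none == PySem.List.slice b none (some i)) ||
      (PySem.List.slice b (some (-i)) none == PySem.List.slice a none (some i))) := by
  suffices h : ∀ (n : Nat) (i : Int), (stop - i).toNat = n →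
      pvLoopA a b stop i = (PySem.List.pyRange i stop 1).any (fun i =>
        (PySem.List.slice a (some (-i)) none == PySem.List.slice b none (some i)) ||
        (PySem.List.slice b (some (-i)) none == PySem.List.slice a none (some i))) by
    exact h _ i0 rfl
  intro n
  induction n using Nat.strong_induction_on with
  | _ n ih =>
    intro i hn
    rw [pvLoopA]
    by_cases hlt : i < stop
    · rw [if_pos hlt, PySem.List.pyRange_one_cons hlt, List.any_cons]
      rw [ih ((stop - (i + 1)).toNat) (by omega) (i + 1) rfl]
      by_cases hc : ((PySem.List.slice a (some (-i)) none == PySem.List.slice b none (some i)) ||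
          (PySem.List.slice b (some (-i)) none == PySem.List.slice a none (some i))) = true
      · simp [hc]
      · simp only [Bool.not_eq_true] at hc
        simp [hc]
    · rw [if_neg hlt, PySem.List.pyRange_one_eq_nil (by omega)]
      simp

-- p ↦ p * BASE % M iterated n times (value of the pw table)
def pvIter (p : Int) : Nat → Int
  | 0 => p
  | n + 1 => pvIter (PySem.Int.mod (p * 1114113) 2305843009213693951) n

theorem pvIter_pow (n : Nat) : ∀ k : Nat,
    pvIter (1114113 ^ k % 2305843009213693951) n = 1114113 ^ (k + n) % 2305843009213693951 := by
  induction n with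
  | zero => intro k; rfl
  | succ n ih =>
    intro k
    show pvIter (PySem.Int.mod (1114113 ^ k % 2305843009213693951 * 1114113) 2305843009213693951) n = _
    have hstep : PySem.Int.mod (1114113 ^ k % 2305843009213693951 * 1114113) 2305843009213693951
        = 1114113 ^ (k + 1) % 2305843009213693951 := by
      rw [PySem.Int.mod_eq_emod_of_pos (by norm_num)]
      conv_rhs => rw [pow_succ, Int.mul_emod]
      norm_num
    rw [hstep, ih (k + 1)]
    have hexp : k + 1 + n = k + (n + 1) := by omega
    rw [hexp]

theorem pvPows_build (l : List Int) : ∀ (acc : List Int) (p : Int),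
    (l.foldl (fun (st : List Int × Int) _ =>
        let p' := PySem.Int.mod (st.2 * 1114113) 2305843009213693951
        (st.1 ++ [p'], p')) (acc, p)).1
    = acc ++ (List.range l.length).map (fun j => pvIter p (j + 1)) := by
  induction l with
  | nil => intro acc p; simp
  | cons x t ih =>
    intro acc p
    simp only [List.foldl_cons]
    rw [ih]
    simp only [List.length_cons]
    rw [List.range_succ_eq_map]
    simp [List.map_map, Function.comp, List.append_assoc, pvIter]

theorem pvPows_getD (m : Int) (k : Nat) (hk : k ≤ m.toNat) :
    (pvPows m).getD k 0 = 1114113 ^ k % 2305843009213693951 := by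
  unfold pvPows
  rw [pvPows_build]
  have hlen : (PySem.List.pyRange 0 m 1).length = m.toNat := by
    rw [PySem.List.length_pyRange_one]; omega
  rw [hlen]
  cases k with
  | zero => norm_num
  | succ k =>
    have hk' : k < m.toNat := by omega
    have hone : (1 : Int) = 1114113 ^ 0 % 2305843009213693951 := by norm_num
    simp only [List.getD, List.getElem?_cons_succ, List.singleton_append]
    rw [List.getElem?_map, List.getElem?_range hk']
    simp only [Option.map_some, Option.getD_some]
    rw [hone, pvIter_pow]
    norm_num

theorem pv_per_i (a b : List Char) (min_stem_len i : Int) (hpre : 1 ≤ min_stem_len)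
    (hi : i ∈ PySem.List.pyRange min_stem_len (min (a.length : Int) (b.length : Int)) 1) :
    ((PySem.List.slice a (some (-i)) none == PySem.List.slice b none (some i)) ||
     (PySem.List.slice b (some (-i)) none == PySem.List.slice a none (some i)))
    = (((PySem.Int.mod (PySem.List.pyGetD (pvPref a) (a.length : Int) 0
            - PySem.List.pyGetD (pvPref a) ((a.length : Int) - i) 0
              * PySem.List.pyGetD (pvPows (min (a.length : Int) (b.length : Int))) i 0) 2305843009213693951
          == PySem.List.pyGetD (pvPref b) i 0)
        && (PySem.List.slice a (some ((a.length : Int) - i)) none == PySem.List.slice b none (some i)))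
      || ((PySem.Int.mod (PySem.List.pyGetD (pvPref b) (b.length : Int) 0
            - PySem.List.pyGetD (pvPref b) ((b.length : Int) - i) 0
              * PySem.List.pyGetD (pvPows (min (a.length : Int) (b.length : Int))) i 0) 2305843009213693951
          == PySem.List.pyGetD (pvPref a) i 0)
        && (PySem.List.slice b (some ((b.length : Int) - i)) none == PySem.List.slice a none (some i)))) := by
  rw [PySem.List.mem_pyRange_one] at hi
  set k := i.toNat with hkdef
  have hik : i = (k : Int) := by omega
  have hk0 : 0 < k := by omega
  have hmin : (k : Int) < min (a.length : Int) (b.length : Int) := by omega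
  have hka : k ≤ a.length := by
    have := lt_min_iff.mp hmin
    omega
  have hkb : k ≤ b.length := by
    have := lt_min_iff.mp hmin
    omega
  rw [hik, PySem.List.slice_from_neg_natCast a k hk0, PySem.List.slice_from_neg_natCast b k hk0,
      PySem.List.slice_to b (by omega : (0:Int) ≤ ((k:Nat):Int)),
      PySem.List.slice_to a (by omega : (0:Int) ≤ ((k:Nat):Int)),
      PySem.List.slice_from a (by omega : (0:Int) ≤ (a.length : Int) - (k:Int)),
      PySem.List.slice_from b (by omega : (0:Int) ≤ (b.length : Int) - (k:Int))]
  have hta : ((a.length : Int) - (k : Int)).toNat = a.length - k := by omega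
  have htb : ((b.length : Int) - (k : Int)).toNat = b.length - k := by omega
  have htk : ((k : Int)).toNat = k := by omega
  rw [hta, htb, htk]
  have hga : (a.length : Int) - (k : Int) = (((a.length - k : Nat)) : Int) := by omega
  have hgb : (b.length : Int) - (k : Int) = (((b.length - k : Nat)) : Int) := by omega
  have hkm : k ≤ (min (a.length : Int) (b.length : Int)).toNat := by omega
  rw [hga, hgb, PySem.List.pyGetD_natCast, PySem.List.pyGetD_natCast, PySem.List.pyGetD_natCast,
      PySem.List.pyGetD_natCast, PySem.List.pyGetD_natCast, PySem.List.pyGetD_natCast,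
      PySem.List.pyGetD_natCast,
      pvPref_getD a a.length (by omega), pvPref_getD b b.length (by omega),
      pvPref_getD a (a.length - k) (by omega), pvPref_getD b (b.length - k) (by omega),
      pvPref_getD a k hka, pvPref_getD b k hkb, List.take_length, List.take_length,
      pvPows_getD _ k hkm,
      PySem.Int.mod_eq_emod_of_pos (by norm_num), PySem.Int.mod_eq_emod_of_pos (by norm_num)]
  rw [Bool.eq_iff_iff]
  simp only [Bool.or_eq_true, Bool.and_eq_true, beq_iff_eq]
  by_cases h1 : a.drop (a.length - k) = b.take k
  · have e1 := pvHash_hit a b k hk0 hka hkb h1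
    by_cases h2 : b.drop (b.length - k) = a.take k
    · have e2 := pvHash_hit b a k hk0 hkb hka h2
      simp [h1, h2, e1, e2]
    · simp [h1, h2, e1]
  · by_cases h2 : b.drop (b.length - k) = a.take k
    · have e2 := pvHash_hit b a k hk0 hkb hka h2
      simp [h1, h2, e2]
    · simp [h1, h2]

-- ===== VERDICT (by name: the statement is the Claim_ definition above) =====
theorem check_shared_stem_spec : Claim_equal_check_shared_stem := by
  intro w1 w2 min_stem_len _hdom hpre
  unfold Pre_check_shared_stem at hpre
  unfold Spec_check_shared_stem
  unfold check_shared_stem check_shared_stem_alt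
  set a := PySem.Chars.lower w1.toList with ha
  set b := PySem.Chars.lower w2.toList with hb
  by_cases h1 : (decide (min_stem_len ≤ (a.length : Int)) && PySem.Chars.isIn a b) = true
  · simp [h1]
  · by_cases h2 : (decide (min_stem_len ≤ (b.length : Int)) && PySem.Chars.isIn b a) = true
    · simp [h1, h2]
    · simp only [h1, h2, if_false, Bool.false_eq_true]
      rw [pvLoopA_any, max_eq_left hpre]
      rw [Bool.eq_iff_iff]
      simp only [List.any_eq_true]
      constructor
      · rintro ⟨i, hi, hc⟩
        exact ⟨i, hi, by rw [← pv_per_i a b min_stem_len i hpre hi]; exact hc⟩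
      · rintro ⟨i, hi, hc⟩
        exact ⟨i, hi, by rw [pv_per_i a b min_stem_len i hpre hi]; exact hc⟩
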